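-- pv_equiv track=rewrite | github.com/orsha1/moments-representation | gen-features3-rlx/embed-rlx.py | self_returning_paths
-- ===== SOURCE A (Python) =====
-- def self_returning_paths(graph, start, steps):
--     def dfs(curr, path):
--         path.append(curr)
--         if curr == start and len(path) == steps + 1:
--             self_returning.append(path[:])
--         if len(path) > steps + 1:
--             path.pop()
--             return
--         for neighbor in graph[curr]:
--             dfs(neighbor, path)
--         path.pop()
--
--     self_returning = []
--     path = []
--     dfs(start, path)
--     return self_returning
-- ===== SOURCE B (Python) =====
-- def self_returning_paths(graph, start, steps):
--     # Level-wise (BFS) path extension instead of recursive DFS: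
--     # repeatedly extend every partial path by one edge, then keep the
--     # full-length paths that return to start.  Same left-to-right order.
--     paths = [[start]]
--     for _ in range(steps):
--         paths = [p + [n] for p in paths for n in graph[p[-1]]]
--     return [p for p in paths if len(p) == steps + 1 and p[-1] == start]
-- ===== Notes on version B (the rewrite author's own statement) =====
-- stated objective: simpler
-- what changed: Replaces A's recursive DFS with an accumulator and mutable path by level-wise (breadth-first) path extension — steps rounds of 'extend every partial path by one edge' followed by a single filter for full-length paths that return to start — which yields the same paths in the same order.
import Mathlib
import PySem

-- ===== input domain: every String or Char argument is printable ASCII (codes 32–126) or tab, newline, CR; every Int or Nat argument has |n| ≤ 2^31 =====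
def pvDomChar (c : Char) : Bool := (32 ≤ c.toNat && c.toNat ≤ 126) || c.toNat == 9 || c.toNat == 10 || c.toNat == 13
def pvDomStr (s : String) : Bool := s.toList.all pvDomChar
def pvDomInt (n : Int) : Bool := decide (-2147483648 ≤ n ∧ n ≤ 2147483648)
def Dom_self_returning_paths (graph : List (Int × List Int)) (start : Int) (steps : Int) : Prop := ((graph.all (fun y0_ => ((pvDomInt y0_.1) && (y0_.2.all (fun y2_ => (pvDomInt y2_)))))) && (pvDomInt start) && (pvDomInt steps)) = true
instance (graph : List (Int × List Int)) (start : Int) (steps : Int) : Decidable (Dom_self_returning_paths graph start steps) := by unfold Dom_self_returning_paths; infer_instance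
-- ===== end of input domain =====

-- B replaces A's recursive DFS by level-wise (breadth-first) path extension and a final
-- filter; objective: simpler (same asymptotic cost, same output order).

-- graph[x] lookup, shared by both ports (first-match dict lookup per the type convention)
def pvNbrs (graph : List (Int × List Int)) (x : Int) : List Int :=
  ((PySem.Dict.mk graph).get? x).getD []

-- p[-1] (paths are always nonempty, so the default is never used)
def pvLast (p : List Int) : Int := (PySem.List.pyGet? p (-1)).getD 0

-- ===== PORT A =====
-- A's recursive dfs with path passed by value and the result accumulated; fuel only
-- makes the recursion structural (the prune branch bounds the real depth by steps+2,
-- so fuel = steps.toNat + 3 is never exhausted).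
def pvDfsA (graph : List (Int × List Int)) (start steps : Int) :
    Nat → Int → List Int → List (List Int) → List (List Int)
  | 0, _, _, acc => acc
  | fuel+1, curr, path, acc =>
    let path' := path ++ [curr]
    let acc' := if curr = start ∧ ((path'.length : Int) = steps + 1) then acc ++ [path'] else acc
    if (steps + 1 : Int) < (path'.length : Int) then acc'
    else (pvNbrs graph curr).foldl (fun a n => pvDfsA graph start steps fuel n path' a) acc'

def self_returning_paths (graph : List (Int × List Int)) (start : Int) (steps : Int) : List (List Int) :=
  pvDfsA graph start steps (steps.toNat + 3) start [] []

-- ===== PORT B =====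
-- one round of 'paths = [p + [n] for p in paths for n in graph[p[-1]]]'
def pvExtend (graph : List (Int × List Int)) (paths : List (List Int)) : List (List Int) :=
  paths.flatMap (fun p => (pvNbrs graph (pvLast p)).map (fun n => p ++ [n]))

def self_returning_paths_alt (graph : List (Int × List Int)) (start : Int) (steps : Int) : List (List Int) :=
  ((PySem.List.pyRange 0 steps 1).foldl (fun paths _ => pvExtend graph paths) [[start]]).filter
    (fun p => decide ((p.length : Int) = steps + 1) && decide (pvLast p = start))

-- ===== PRECONDITION & SPEC =====
-- the set of nodes reachable from start in at most k edges (missing keys contribute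
-- no neighbours); it stabilises after at most Σ|adjacency| rounds, so Pre_ caps the
-- iteration there to stay cheaply computable for any steps
def pvReach (graph : List (Int × List Int)) (start : Int) : Nat → List Int
  | 0 => [start]
  | k+1 =>
    let s := pvReach graph start k
    PySem.Set.ofList (s ++ s.flatMap (fun x => pvNbrs graph x))

-- Pre_ excludes exactly the inputs on which Python A raises KeyError: A looks up
-- graph[x] for every node x reachable from start within ≤ steps edges, so all of
-- those nodes must be keys of graph (vacuous for steps < 0, where A looks nothing up).
def Pre_self_returning_paths (graph : List (Int × List Int)) (start : Int) (steps : Int) : Prop :=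
  0 ≤ steps →
    ∀ x ∈ pvReach graph start (min steps.toNat ((graph.map (fun e => e.2.length)).sum)),
      (PySem.Dict.mk graph).contains x = true
instance (graph : List (Int × List Int)) (start : Int) (steps : Int) : Decidable (Pre_self_returning_paths graph start steps) := by unfold Pre_self_returning_paths; infer_instance

def pvWitness_self_returning_paths : (List (Int × List Int)) × Int × Int := ([(0, [0])], 0, 2)

def Spec_self_returning_paths (graph : List (Int × List Int)) (start : Int) (steps : Int) (out : List (List Int)) : Prop := out = self_returning_paths_alt graph start steps
instance (graph : List (Int × List Int)) (start : Int) (steps : Int) (out : List (List Int)) : Decidable (Spec_self_returning_paths graph start steps out) := by unfold Spec_self_returning_paths; infer_instance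

-- ===== CLAIM (what is proved, stated in full; the proofs are below) =====
def Claim_equal_self_returning_paths : Prop := ∀ (graph : List (Int × List Int)) (start : Int) (steps : Int), Dom_self_returning_paths graph start steps → Pre_self_returning_paths graph start steps → Spec_self_returning_paths graph start steps (self_returning_paths graph start steps)


-- ===== LEMMAS AND PROOFS =====

-- all maximal extensions of the path p by k more edges
def pvExtA (graph : List (Int × List Int)) : Nat → List Int → List (List Int)
  | 0, p => [p]
  | k+1, p => (pvNbrs graph (pvLast p)).flatMap (fun n => pvExtA graph k (p ++ [n]))

lemma pvLast_append (p : List Int) (n : Int) : pvLast (p ++ [n]) = n := by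
  simp [pvLast, PySem.List.pyGet?_neg_one_append_singleton]

lemma length_mem_pvExtA (graph : List (Int × List Int)) :
    ∀ (k : Nat) (p q : List Int), q ∈ pvExtA graph k p → q.length = p.length + k := by
  intro k
  induction k with
  | zero => intro p q hq; simp [pvExtA] at hq; simp [hq]
  | succ k ih =>
    intro p q hq
    simp only [pvExtA, List.mem_flatMap] at hq
    obtain ⟨n, _, hq⟩ := hq
    have := ih (p ++ [n]) q hq
    simp at this; omega

lemma pvDfsA_eq (graph : List (Int × List Int)) (start steps : Int) :
    ∀ (k : Nat) (fuel : Nat) (curr : Int) (path : List Int) (acc : List (List Int)),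
      k + 2 ≤ fuel → ((path.length : Int) + 1 = steps + 1 - k) →
      pvDfsA graph start steps fuel curr path acc
        = acc ++ (pvExtA graph k (path ++ [curr])).filter (fun q => decide (pvLast q = start)) := by
  intro k
  induction k with
  | zero =>
    intro fuel curr path acc hfuel hlen
    match fuel, hfuel with
    | f+2, _ =>
      simp only [pvDfsA]
      have hlen' : ((path ++ [curr]).length : Int) = steps + 1 := by simp; omega
      have hprune : ¬ (steps + 1 : Int) < ((path ++ [curr]).length : Int) := by omega
      rw [if_neg hprune]
      rw [PySem.List.foldl_congr_mem _ _ (fun (a : List (List Int)) _ => a) _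
        (by
          intro a n _
          have h2 : (steps + 1 : Int) < ((path ++ [curr] ++ [n]).length : Int) := by
            simp; omega
          have h1 : ¬ (n = start ∧ (((path ++ [curr] ++ [n]).length : Int) = steps + 1)) := by
            rintro ⟨_, h⟩; omega
          simp only [if_pos h2, if_neg h1])]
      rw [PySem.List.foldl_ignore]
      simp only [pvExtA, List.filter, pvLast_append]
      by_cases hc : curr = start
      · rw [if_pos ⟨hc, hlen'⟩]; simp [hc]
      · rw [if_neg (by rintro ⟨h, _⟩; exact hc h)]; simp [hc]
  | succ k ih =>
    intro fuel curr path acc hfuel hlen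
    match fuel, hfuel with
    | f+1, hfuel =>
      have hf : k + 2 ≤ f := by omega
      simp only [pvDfsA]
      have h1 : ¬ (curr = start ∧ (((path ++ [curr]).length : Int) = steps + 1)) := by
        rintro ⟨_, h⟩; simp at h; omega
      have h2 : ¬ (steps + 1 : Int) < ((path ++ [curr]).length : Int) := by simp; omega
      rw [if_neg h1, if_neg h2]
      rw [PySem.List.foldl_congr_mem _ _
        (fun a n => a ++ (pvExtA graph k ((path ++ [curr]) ++ [n])).filter
          (fun q => decide (pvLast q = start))) _
        (by
          intro a n _
          exact ih f n (path ++ [curr]) a hf (by simp; omega))]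
      rw [PySem.List.foldl_append_eq_flatMap
        (fun n => (pvExtA graph k ((path ++ [curr]) ++ [n])).filter
          (fun q => decide (pvLast q = start)))]
      simp only [pvExtA, pvLast_append, List.filter_flatMap]

lemma pvExtend_append (graph : List (Int × List Int)) (l1 l2 : List (List Int)) :
    pvExtend graph (l1 ++ l2) = pvExtend graph l1 ++ pvExtend graph l2 := by
  simp [pvExtend]

lemma iterate_pvExtend_append (graph : List (Int × List Int)) :
    ∀ (k : Nat) (l1 l2 : List (List Int)),
      (pvExtend graph)^[k] (l1 ++ l2) = (pvExtend graph)^[k] l1 ++ (pvExtend graph)^[k] l2 := by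
  intro k
  induction k with
  | zero => intro l1 l2; simp
  | succ k ih =>
    intro l1 l2
    simp only [Function.iterate_succ_apply, pvExtend_append, ih]

lemma iterate_pvExtend_nil (graph : List (Int × List Int)) :
    ∀ (k : Nat), (pvExtend graph)^[k] ([] : List (List Int)) = [] := by
  intro k
  induction k with
  | zero => rfl
  | succ k ih => rw [Function.iterate_succ_apply, show pvExtend graph [] = [] from rfl, ih]

lemma iterate_pvExtend_flatMap (graph : List (Int × List Int)) (k : Nat) :
    ∀ (l : List (List Int)),
      (pvExtend graph)^[k] l = l.flatMap (fun p => (pvExtend graph)^[k] [p]) := by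
  intro l
  induction l with
  | nil => simp [iterate_pvExtend_nil]
  | cons p l ih =>
    have : p :: l = [p] ++ l := rfl
    rw [this, iterate_pvExtend_append, ih]
    simp

lemma iterate_pvExtend_eq_pvExtA (graph : List (Int × List Int)) :
    ∀ (k : Nat) (p : List Int), (pvExtend graph)^[k] [p] = pvExtA graph k p := by
  intro k
  induction k with
  | zero => intro p; simp [pvExtA]
  | succ k ih =>
    intro p
    rw [Function.iterate_succ_apply]
    have hF : pvExtend graph [p] = (pvNbrs graph (pvLast p)).map (fun n => p ++ [n]) := by
      simp [pvExtend]
    rw [hF, iterate_pvExtend_flatMap, List.flatMap_map]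
    rw [show (fun n => (pvExtend graph)^[k] [p ++ [n]]) = (fun n => pvExtA graph k (p ++ [n]))
      from funext (fun n => ih (p ++ [n]))]
    rfl

lemma pvDfsA_neg (graph : List (Int × List Int)) (start steps : Int) (h : steps < 0)
    (fuel : Nat) : pvDfsA graph start steps (fuel + 1) start [] [] = [] := by
  simp only [pvDfsA]
  rw [if_pos (show (steps + 1 : Int) < ((([] : List Int) ++ [start]).length : Int) by
    simp only [List.nil_append, List.length_cons, List.length_nil]; omega)]
  simp
  omega

lemma foldl_const_iterate {α β : Type} (F : β → β) :
    ∀ (l : List α) (s : β), l.foldl (fun st _ => F st) s = F^[l.length] s := by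
  intro l
  induction l with
  | nil => intro s; rfl
  | cons x xs ih =>
    intro s
    simp only [List.foldl_cons, ih, List.length_cons]
    rw [Function.iterate_succ_apply]

-- ===== VERDICT (by name: the statement is the Claim_ definition above) =====
theorem self_returning_paths_spec : Claim_equal_self_returning_paths := by
  intro graph start steps _ _
  unfold Spec_self_returning_paths self_returning_paths self_returning_paths_alt
  rw [foldl_const_iterate, PySem.List.length_pyRange_one]
  by_cases hs : 0 ≤ steps
  · rw [pvDfsA_eq graph start steps steps.toNat (steps.toNat + 3) start [] []
      (by omega) (by simp; omega)]
    rw [show (steps - 0).toNat = steps.toNat by omega, iterate_pvExtend_eq_pvExtA]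
    simp only [List.nil_append]
    exact List.filter_congr (fun q hq => by
      have hlq := length_mem_pvExtA graph steps.toNat [start] q hq
      have hl : ((q.length : Int) = steps + 1) := by simp at hlq; omega
      simp [hl])
  · have h0 : steps.toNat = 0 := by omega
    have hA : pvDfsA graph start steps (steps.toNat + 3) start [] [] = [] := by
      rw [h0]; exact pvDfsA_neg graph start steps (by omega) 2
    rw [hA, show (steps - 0).toNat = 0 by omega]
    simp only [Function.iterate_zero, id_eq]
    have hne : ¬ ((1 : Int) = steps + 1) := by omega
    simp [hne]
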